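-- pv_equiv track=rewrite | github.com/JKR8/querytorque_v8 | qt-synth/legacy/validator_v2.py | _guess_table_from_column
-- ===== SOURCE A (Python) =====
-- from typing import Dict, List, Set, Tuple, Any, Optional
--
-- def _guess_table_from_column(col_name: str) -> Optional[str]:
--     """Guess table from column name."""
--     col_lower = col_name.lower()
--
--     # TPC-DS patterns
--     patterns = {
--         'ws_': 'web_sales', 'ss_': 'store_sales', 'cs_': 'catalog_sales',
--         'wr_': 'web_returns', 'sr_': 'store_returns', 'cr_': 'catalog_returns',
--         'd_': 'date_dim', 't_': 'time_dim',
--         'c_': 'customer', 'ca_': 'customer_address', 'cd_': 'customer_demographics',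
--         's_': 'store', 'i_': 'item', 'p_': 'promotion',
--     }
--
--     for prefix, table in patterns.items():
--         if col_lower.startswith(prefix):
--             return table
--
--     return None
-- ===== SOURCE B (Python) =====
-- from typing import Optional
--
-- _ONE = {'d': 'date_dim', 't': 'time_dim', 'c': 'customer',
--         's': 'store', 'i': 'item', 'p': 'promotion'}
-- _TWO = {'ws': 'web_sales', 'ss': 'store_sales', 'cs': 'catalog_sales',
--         'wr': 'web_returns', 'sr': 'store_returns', 'cr': 'catalog_returns',
--         'ca': 'customer_address', 'cd': 'customer_demographics'}
--
-- def _guess_table_from_column(col_name: str) -> Optional[str]: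
--     """Guess table from column name."""
--     s = col_name.lower()
--     u = s.find('_')
--     if u == 1:
--         return _ONE.get(s[:1])
--     if u == 2:
--         return _TWO.get(s[:2])
--     return None
-- ===== Notes on version B (the rewrite author's own statement) =====
-- stated objective: simpler
-- what changed: Replaces A's linear startswith-scan over one 14-entry pattern dict by a decision on the position of the first underscore (1 or 2) followed by a direct lookup of the 1- or 2-char prefix in one of two small dicts keyed by the prefix letters alone; exact because every pattern key ends at its first underscore, so its underscore position determines which table can match.
import Mathlib
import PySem

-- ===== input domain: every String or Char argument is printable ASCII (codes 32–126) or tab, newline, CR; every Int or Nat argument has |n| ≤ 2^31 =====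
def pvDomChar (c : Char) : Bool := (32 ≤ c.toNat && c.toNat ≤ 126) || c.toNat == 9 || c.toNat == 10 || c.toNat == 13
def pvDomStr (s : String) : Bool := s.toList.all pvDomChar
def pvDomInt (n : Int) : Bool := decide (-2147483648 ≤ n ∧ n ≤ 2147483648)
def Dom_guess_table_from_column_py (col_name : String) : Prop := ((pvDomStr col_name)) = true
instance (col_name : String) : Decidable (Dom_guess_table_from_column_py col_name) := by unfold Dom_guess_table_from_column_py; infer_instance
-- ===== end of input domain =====

-- B replaces the linear startswith-scan over the 14-pattern dict by a decision on the
-- position of the first underscore (1 or 2) plus a direct lookup of the 1- or 2-char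
-- prefix in one of two small dicts keyed by the prefix letters alone (objective: simpler).


-- ===== PORT A =====
-- A's TPC-DS pattern dict, verbatim
def pvPatterns : PySem.Dict String String := PySem.Dict.ofList
  [("ws_", "web_sales"), ("ss_", "store_sales"), ("cs_", "catalog_sales"),
   ("wr_", "web_returns"), ("sr_", "store_returns"), ("cr_", "catalog_returns"),
   ("d_", "date_dim"), ("t_", "time_dim"),
   ("c_", "customer"), ("ca_", "customer_address"), ("cd_", "customer_demographics"),
   ("s_", "store"), ("i_", "item"), ("p_", "promotion")]

-- A's loop: 'for prefix, table in patterns.items(): if col_lower.startswith(prefix): return table'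
def pvScanA (items : List (String × String)) (s : String) : Option String :=
  match items with
  | [] => none
  | (pre, table) :: rest =>
    if PySem.Str.startswith s pre then some table else pvScanA rest s

def guess_table_from_column_py (col_name : String) : Option String :=
  let col_lower := PySem.Str.lower col_name
  pvScanA pvPatterns.items col_lower

-- ===== PORT B =====
-- B's two small dicts: tables whose column prefix is one letter resp. two letters
def pvOne : PySem.Dict String String := PySem.Dict.ofList
  [("d", "date_dim"), ("t", "time_dim"), ("c", "customer"),
   ("s", "store"), ("i", "item"), ("p", "promotion")]
def pvTwo : PySem.Dict String String := PySem.Dict.ofList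
  [("ws", "web_sales"), ("ss", "store_sales"), ("cs", "catalog_sales"),
   ("wr", "web_returns"), ("sr", "store_returns"), ("cr", "catalog_returns"),
   ("ca", "customer_address"), ("cd", "customer_demographics")]

def guess_table_from_column_py_alt (col_name : String) : Option String :=
  let s := PySem.Str.lower col_name
  let u := PySem.Str.find s "_"
  if u == 1 then PySem.Dict.get? pvOne (PySem.Str.slice s none (some 1))
  else if u == 2 then PySem.Dict.get? pvTwo (PySem.Str.slice s none (some 2))
  else none

-- ===== PRECONDITION & SPEC =====
def Spec_guess_table_from_column_py (col_name : String) (out : Option String) : Prop := out = guess_table_from_column_py_alt col_name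
instance (col_name : String) (out : Option String) : Decidable (Spec_guess_table_from_column_py col_name out) := by unfold Spec_guess_table_from_column_py; infer_instance

-- ===== CLAIM (what is proved, stated in full; the proofs are below) =====
def Claim_equal_guess_table_from_column_py : Prop := ∀ (col_name : String), Dom_guess_table_from_column_py col_name → Spec_guess_table_from_column_py col_name (guess_table_from_column_py col_name)

-- ===== LEMMAS AND PROOFS =====

-- every key of the pattern dict is a block of non-underscore chars followed by one final '_'
def pvGoodKey (p : String) : Prop := ∃ q, p.toList = q ++ ['_'] ∧ '_' ∉ q

lemma pv_singleton_prefix (x : Char) (xs : List Char) : [x] <+: xs ↔ xs.head? = some x := by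
  cases xs <;> simp [List.cons_prefix_cons, eq_comm]

-- if the lowered name has no underscore, no pattern key is a prefix of it
lemma pv_startswith_false (s p : String) (hg : pvGoodKey p)
    (hf : PySem.Chars.find s.toList ['_'] = -1) :
    PySem.Str.startswith s p = false := by
  obtain ⟨q, hq, -⟩ := hg
  rw [PySem.Str.startswith_eq]
  by_contra h
  have hpre : p.toList <+: s.toList := (PySem.Chars.startswith_iff _ _).1 (by simpa using h)
  have hmem : '_' ∈ s.toList := hpre.mem (by simp [hq])
  exact ((PySem.Chars.find_eq_neg_one_iff _ _).1 hf) ((List.singleton_infix_iff _ _).2 hmem)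

-- a good key is a prefix of s iff it equals s's prefix up to and including the first underscore
lemma pv_startswith_iff_take (s p : String) (hg : pvGoodKey p)
    (hf : PySem.Chars.find s.toList ['_'] ≠ -1) :
    PySem.Str.startswith s p = true ↔
      s.toList.take ((PySem.Chars.find s.toList ['_']).toNat + 1) = p.toList := by
  obtain ⟨q, hq, hnq⟩ := hg
  have h0 : 0 ≤ PySem.Chars.find s.toList ['_'] := by
    have := PySem.Chars.neg_one_le_find s.toList ['_']; omega
  obtain ⟨hpre, hmin⟩ := PySem.Chars.find_spec h0
  rw [PySem.Str.startswith_eq, PySem.Chars.startswith_iff, hq]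
  set n := (PySem.Chars.find s.toList ['_']).toNat with hn
  constructor
  · rintro ⟨r, hr⟩
    have hr' : s.toList = q ++ '_' :: r := by rw [← hr]; simp
    have hget : s.toList[n]? = some '_' := by
      rw [← List.head?_drop]
      exact (pv_singleton_prefix _ _).1 hpre
    have hfq : n = q.length := by
      by_contra hne
      rcases Nat.lt_or_ge n q.length with hlt | hge
      · apply hnq
        rw [hr', List.getElem?_append_left hlt] at hget
        exact List.mem_of_getElem? hget
      · have hgt : q.length < n := by omega
        apply hmin q.length hgt
        rw [hr', List.drop_append_of_le_length (le_refl _)]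
        simp
    rw [hr', hfq, List.take_append]
    simp
  · intro ht
    calc q ++ ['_'] = s.toList.take _ := ht.symm
      _ <+: s.toList := List.take_prefix _ _

-- A's scan returns none when the lowered name has no underscore
lemma pv_scan_none (items : List (String × String)) (s : String)
    (hgood : ∀ pr ∈ items, pvGoodKey pr.1)
    (hf : PySem.Chars.find s.toList ['_'] = -1) :
    pvScanA items s = none := by
  induction items with
  | nil => rfl
  | cons pr rest ih =>
    obtain ⟨pre, table⟩ := pr
    rw [pvScanA, pv_startswith_false s pre (hgood _ (List.mem_cons_self ..)) hf]
    exact (if_neg (by simp)).trans (ih fun pr h => hgood pr (List.mem_cons_of_mem _ h))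

-- A's first-match scan equals a direct lookup at the underscore-terminated prefix
lemma pv_scan_eq_get (items : List (String × String)) (s : String)
    (hgood : ∀ pr ∈ items, pvGoodKey pr.1)
    (hf : PySem.Chars.find s.toList ['_'] ≠ -1)
    (k : String) (hk : k.toList = s.toList.take ((PySem.Chars.find s.toList ['_']).toNat + 1)) :
    pvScanA items s = PySem.Dict.get? (PySem.Dict.mk items) k := by
  induction items with
  | nil => simp [pvScanA, PySem.Dict.get?]
  | cons pr rest ih =>
    obtain ⟨pre, table⟩ := pr
    have hg := hgood _ (List.mem_cons_self ..)
    rw [pvScanA, PySem.Dict.get?_mk_cons]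
    by_cases hs : PySem.Str.startswith s pre = true
    · have htake : s.toList.take _ = pre.toList := (pv_startswith_iff_take s pre hg hf).1 hs
      have hkp : (pre == k) = true := beq_iff_eq.2 (String.toList_inj.1 (by rw [hk, htake]))
      rw [if_pos hs, if_pos hkp]
    · have hne : (pre == k) ≠ true := by
        intro he
        exact hs ((pv_startswith_iff_take s pre hg hf).2
          (by rw [← hk, beq_iff_eq.1 he]))
      rw [if_neg hs, if_neg hne]
      exact ih fun pr h => hgood pr (List.mem_cons_of_mem _ h)

lemma pv_good_all : ∀ pr ∈ pvPatterns.items, pvGoodKey pr.1 := by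
  intro pr h
  have hitems : pvPatterns.items =
    [("ws_", "web_sales"), ("ss_", "store_sales"), ("cs_", "catalog_sales"),
     ("wr_", "web_returns"), ("sr_", "store_returns"), ("cr_", "catalog_returns"),
     ("d_", "date_dim"), ("t_", "time_dim"),
     ("c_", "customer"), ("ca_", "customer_address"), ("cd_", "customer_demographics"),
     ("s_", "store"), ("i_", "item"), ("p_", "promotion")] := by decide
  rw [hitems] at h
  simp only [List.mem_cons, List.not_mem_nil, or_false] at h
  rcases h with h|h|h|h|h|h|h|h|h|h|h|h|h|h <;> subst h
  · exact ⟨['w','s'], by decide, by decide⟩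
  · exact ⟨['s','s'], by decide, by decide⟩
  · exact ⟨['c','s'], by decide, by decide⟩
  · exact ⟨['w','r'], by decide, by decide⟩
  · exact ⟨['s','r'], by decide, by decide⟩
  · exact ⟨['c','r'], by decide, by decide⟩
  · exact ⟨['d'], by decide, by decide⟩
  · exact ⟨['t'], by decide, by decide⟩
  · exact ⟨['c'], by decide, by decide⟩
  · exact ⟨['c','a'], by decide, by decide⟩
  · exact ⟨['c','d'], by decide, by decide⟩
  · exact ⟨['s'], by decide, by decide⟩
  · exact ⟨['i'], by decide, by decide⟩
  · exact ⟨['p'], by decide, by decide⟩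


lemma pv_get_none_of_ne (items : List (String × String)) (k : String)
    (h : ∀ pr ∈ items, pr.1 ≠ k) :
    PySem.Dict.get? (PySem.Dict.mk items) k = none := by
  induction items with
  | nil => simp [PySem.Dict.get?]
  | cons pr rest ih =>
    rw [PySem.Dict.get?_mk_cons, if_neg (by rw [beq_iff_eq]; exact h pr (List.mem_cons_self ..))]
    exact ih fun pr hm => h pr (List.mem_cons_of_mem _ hm)

lemma pvPatterns_eq : pvPatterns = PySem.Dict.mk
  [("ws_", "web_sales"), ("ss_", "store_sales"), ("cs_", "catalog_sales"),
   ("wr_", "web_returns"), ("sr_", "store_returns"), ("cr_", "catalog_returns"),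
   ("d_", "date_dim"), ("t_", "time_dim"),
   ("c_", "customer"), ("ca_", "customer_address"), ("cd_", "customer_demographics"),
   ("s_", "store"), ("i_", "item"), ("p_", "promotion")] := PySem.Dict.ext (by decide)
lemma pvOne_eq : pvOne = PySem.Dict.mk
  [("d", "date_dim"), ("t", "time_dim"), ("c", "customer"),
   ("s", "store"), ("i", "item"), ("p", "promotion")] := PySem.Dict.ext (by decide)
lemma pvTwo_eq : pvTwo = PySem.Dict.mk
  [("ws", "web_sales"), ("ss", "store_sales"), ("cs", "catalog_sales"),
   ("wr", "web_returns"), ("sr", "store_returns"), ("cr", "catalog_returns"),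
   ("ca", "customer_address"), ("cd", "customer_demographics")] := PySem.Dict.ext (by decide)

lemma pv_get_one (a : Char) :
    PySem.Dict.get? pvPatterns (String.ofList [a, '_']) = PySem.Dict.get? pvOne (String.ofList [a]) := by
  by_cases h1 : a = 'd'; · subst h1; decide
  by_cases h2 : a = 't'; · subst h2; decide
  by_cases h3 : a = 'c'; · subst h3; decide
  by_cases h4 : a = 's'; · subst h4; decide
  by_cases h5 : a = 'i'; · subst h5; decide
  by_cases h6 : a = 'p'; · subst h6; decide
  rw [pvPatterns_eq, pvOne_eq, pv_get_none_of_ne, pv_get_none_of_ne] <;>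
    (intro pr hm
     simp only [List.mem_cons, List.not_mem_nil, or_false] at hm
     rcases hm with h|h|h|h|h|h|h|h|h|h|h|h|h|h <;> (try subst h) <;>
       (intro he; have h2' := congrArg String.toList he; simp at h2' <;> simp_all))
  all_goals simp_all [eq_comm]

lemma pv_get_two (a b : Char) :
    PySem.Dict.get? pvPatterns (String.ofList [a, b, '_']) = PySem.Dict.get? pvTwo (String.ofList [a, b]) := by
  by_cases h1 : a = 'w' ∧ b = 's'; · obtain ⟨rfl, rfl⟩ := h1; decide
  by_cases h2 : a = 's' ∧ b = 's'; · obtain ⟨rfl, rfl⟩ := h2; decide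
  by_cases h3 : a = 'c' ∧ b = 's'; · obtain ⟨rfl, rfl⟩ := h3; decide
  by_cases h4 : a = 'w' ∧ b = 'r'; · obtain ⟨rfl, rfl⟩ := h4; decide
  by_cases h5 : a = 's' ∧ b = 'r'; · obtain ⟨rfl, rfl⟩ := h5; decide
  by_cases h6 : a = 'c' ∧ b = 'r'; · obtain ⟨rfl, rfl⟩ := h6; decide
  by_cases h7 : a = 'c' ∧ b = 'a'; · obtain ⟨rfl, rfl⟩ := h7; decide
  by_cases h8 : a = 'c' ∧ b = 'd'; · obtain ⟨rfl, rfl⟩ := h8; decide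
  rw [pvPatterns_eq, pvTwo_eq, pv_get_none_of_ne, pv_get_none_of_ne] <;>
    (intro pr hm
     simp only [List.mem_cons, List.not_mem_nil, or_false] at hm
     rcases hm with h|h|h|h|h|h|h|h|h|h|h|h|h|h <;> (try subst h) <;>
       (intro he; have h2' := congrArg String.toList he; simp at h2' <;> simp_all))
  all_goals simp_all [eq_comm]

lemma pv_get_underscore : PySem.Dict.get? pvPatterns (String.ofList ['_']) = none := by decide

lemma pv_mk_items : PySem.Dict.mk pvPatterns.items = pvPatterns := rfl

lemma pv_get_long (k : String) (hk : 3 < k.toList.length) :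
    PySem.Dict.get? pvPatterns k = none := by
  rw [pvPatterns_eq, pv_get_none_of_ne]
  intro pr hm
  simp only [List.mem_cons, List.not_mem_nil, or_false] at hm
  rcases hm with h|h|h|h|h|h|h|h|h|h|h|h|h|h <;> subst h <;>
    (intro he; rw [← he] at hk; simp at hk)

-- ===== VERDICT (by name: the statement is the Claim_ definition above) =====
theorem guess_table_from_column_py_spec : Claim_equal_guess_table_from_column_py := by
  intro col_name _
  unfold Spec_guess_table_from_column_py guess_table_from_column_py guess_table_from_column_py_alt
  dsimp only
  set l := PySem.Str.lower col_name with hl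
  have hfind : PySem.Str.find l "_" = PySem.Chars.find l.toList ['_'] := by
    rw [PySem.Str.find_eq]; rfl
  set u := PySem.Chars.find l.toList ['_'] with hu
  by_cases hf : u = -1
  · rw [pv_scan_none pvPatterns.items l pv_good_all hf]
    rw [hfind, hf]
    norm_num
  · have h0 : 0 ≤ u := by have := PySem.Chars.neg_one_le_find l.toList ['_']; omega
    obtain ⟨hpre, hmin⟩ := PySem.Chars.find_spec (s := l.toList) (sub := ['_']) (by rw [← hu]; exact h0)
    have hlen : u.toNat < l.toList.length := by
      have hne : l.toList.drop u.toNat ≠ [] := by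
        intro hnil; rw [hnil] at hpre; simp at hpre
      have := List.length_drop (l := l.toList) (i := u.toNat)
      by_contra hc
      exact hne (List.eq_nil_of_length_eq_zero (by omega))
    have hslice : ∀ (m : Nat), (PySem.Str.slice l none (some (m : Int))).toList = l.toList.take m := by
      intro m
      rw [PySem.Str.toList_slice, PySem.Chars.slice_eq_listSlice,
          PySem.List.slice_to l.toList (b := (m : Int)) (by omega)]
      simp
    -- characterize the underscore at position u.toNat
    have hget : l.toList[u.toNat]? = some '_' := by
      rw [← List.head?_drop]
      cases hdrop : l.toList.drop u.toNat with
      | nil => rw [hdrop] at hpre; simp at hpre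
      | cons x t =>
        rw [hdrop] at hpre
        obtain ⟨r, hr⟩ := hpre
        simp at hr ⊢
        exact hr.1.symm
    rw [pv_scan_eq_get pvPatterns.items l pv_good_all hf (String.ofList (l.toList.take (u.toNat + 1))) (by simp [← hu]), pv_mk_items]
    rw [hfind]
    by_cases h1 : u = 1
    · -- l = a :: '_' :: t
      rw [h1]
      norm_num
      cases hcl : l.toList with
      | nil => rw [hcl] at hlen; simp [h1] at hlen
      | cons a t =>
        have hb : t[0]? = some '_' := by
          rw [hcl, h1] at hget; simpa using hget
        cases t with
        | nil => simp at hb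
        | cons b t' =>
          simp at hb
          subst hb
          have hs1 : (PySem.Str.slice l none (some 1)) = String.ofList [a] := by
            apply String.toList_inj.1
            rw [show (PySem.Str.slice l none (some 1)).toList = List.take 1 l.toList from by
                  simpa using hslice 1, hcl]
            simp
          rw [hs1]
          simpa using pv_get_one a
    by_cases h2 : u = 2
    · rw [h2]
      norm_num
      cases hcl : l.toList with
      | nil => rw [hcl] at hlen; simp [h2] at hlen
      | cons a t =>
        cases t with
        | nil => rw [hcl, h2] at hlen; simp at hlen
        | cons b t' =>
          have hc : t'[0]? = some '_' := by
            rw [hcl, h2] at hget; simpa using hget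
          cases t' with
          | nil => simp at hc
          | cons c t'' =>
            simp at hc
            subst hc
            have hs2 : (PySem.Str.slice l none (some 2)) = String.ofList [a, b] := by
              apply String.toList_inj.1
              rw [show (PySem.Str.slice l none (some 2)).toList = List.take 2 l.toList from by
                  simpa using hslice 2, hcl]
              simp
            rw [hs2]
            simpa using pv_get_two a b
    -- u = 0 or u ≥ 3
    rw [if_neg (by simpa using h1), if_neg (by simpa using h2)]
    by_cases h00 : u = 0
    · have : String.ofList (l.toList.take (u.toNat + 1)) = String.ofList ['_'] := by
        congr 1
        rw [h00]
        cases hcl : l.toList with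
        | nil => rw [hcl] at hlen; simp [h00] at hlen
        | cons a t =>
          rw [hcl, h00] at hget
          simp at hget
          rw [hget]
          simp
      rw [this, pv_get_underscore]
    · have h3 : 3 ≤ u := by omega
      apply pv_get_long
      rw [show (String.ofList (List.take (u.toNat + 1) l.toList)).toList
            = List.take (u.toNat + 1) l.toList from by simp,
          List.length_take]
      omega
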